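-- pv_equiv track=rewrite | github.com/Voskakis/AlgorithmProject2 | nlsh/build_pipeline/graph_builder.py | build_csr
-- ===== SOURCE A (Python) =====
-- def build_csr(adj: list[set[int]]):
--     """
--     Convert 1-indexed adjacency list (sets) into CSR arrays for KaHIP:
--       - 0-based adjncy
--       - xadj of length n+1
--       - adjcwgt all = 1
--       - vwgt all = 1
--     """
--     node_count = len(adj) - 1
--
--     xadj = [0]
--     adjncy = []
--     adjcwgt = []
--     vwgt = [1] * node_count
--
--     for u in range(1, node_count + 1):
--         neighbors = sorted(adj[u])
--         for v in neighbors: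
--             adjncy.append(v - 1)
--             adjcwgt.append(1)
--         xadj.append(len(adjncy))
--
--     return vwgt, xadj, adjcwgt, adjncy
-- ===== SOURCE B (Python) =====
-- def build_csr(adj):
--     n = max(len(adj) - 1, 0)
--     edges = sorted((u, v) for u in range(1, n + 1) for v in adj[u])
--     counts = [0] * (n + 1)
--     for u, _ in edges:
--         counts[u] += 1
--     xadj = [0]
--     for c in counts[1:]:
--         xadj.append(xadj[-1] + c)
--     return [1] * n, xadj, [1] * len(edges), [v - 1 for _, v in edges]
-- ===== Notes on version B (the rewrite author's own statement) =====
-- stated objective: alternative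
-- what changed: B tags every edge with its node, sorts the whole tagged edge list once globally (instead of A's per-node sorts inside the loop), reads adjncy directly off the sorted edge list, and derives xadj from a counting pass over the edges followed by a prefix-sum pass.
import Mathlib
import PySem

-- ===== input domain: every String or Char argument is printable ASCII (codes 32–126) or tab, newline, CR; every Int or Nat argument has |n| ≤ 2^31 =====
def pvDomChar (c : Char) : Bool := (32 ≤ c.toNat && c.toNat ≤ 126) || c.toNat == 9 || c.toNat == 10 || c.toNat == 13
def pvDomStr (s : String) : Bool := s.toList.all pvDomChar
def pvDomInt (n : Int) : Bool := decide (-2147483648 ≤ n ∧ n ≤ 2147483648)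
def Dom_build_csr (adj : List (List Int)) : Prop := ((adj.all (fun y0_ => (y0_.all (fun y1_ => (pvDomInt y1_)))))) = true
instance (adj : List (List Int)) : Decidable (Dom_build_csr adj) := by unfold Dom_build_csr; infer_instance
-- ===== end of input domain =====

-- B replaces A's per-row sort-and-emit loop by a different algorithm: it tags every edge with
-- its node, sorts the whole tagged edge list ONCE globally, reads adjncy straight off the sorted
-- edge list, and derives xadj from a counting pass plus a prefix-sum pass (objective: alternative).

-- ===== PORT A =====
def build_csr (adj : List (List Int)) : List Int × List Int × List Int × List Int :=
  let node_count : Int := (adj.length : Int) - 1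
  let vwgt : List Int := List.replicate node_count.toNat 1
  let st := (PySem.List.pyRange 1 (node_count + 1) 1).foldl
    (fun (st : List Int × List Int × List Int) u =>
      let neighbors := PySem.List.sorted (PySem.List.pyGetD adj u []) (fun x => x) false
      let st2 := neighbors.foldl
        (fun (p : List Int × List Int) v => (p.1 ++ [v - 1], p.2 ++ [1])) (st.2.1, st.2.2)
      (st.1 ++ [(st2.1.length : Int)], st2.1, st2.2))
    ([0], [], [])
  (vwgt, st.1, st.2.2, st.2.1)

-- ===== PORT B =====
def build_csr_alt (adj : List (List Int)) : List Int × List Int × List Int × List Int :=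
  let n : Int := max ((adj.length : Int) - 1) 0
  -- sorted(tuples) = sorted2 with the two tuple components as keys (lexicographic)
  let edges : List (Int × Int) :=
    PySem.List.sorted2
      ((PySem.List.pyRange 1 (n + 1) 1).flatMap
        (fun u => (PySem.List.pyGetD adj u []).map (fun v => (u, v))))
      (fun p => p.1) (fun p => p.2) false
  let counts0 : List Int := List.replicate (n + 1).toNat 0
  -- counts[u] += 1 : u always lies in 1..n here, so set/getD are exact for Python's counts[u]
  let counts : List Int :=
    edges.foldl (fun cs p => cs.set p.1.toNat (cs.getD p.1.toNat 0 + 1)) counts0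
  let xadj : List Int := (PySem.List.slice counts (some 1) none).foldl
    (fun (x : List Int) c => x ++ [PySem.List.pyGetD x (-1) 0 + c]) [0]
  (List.replicate n.toNat 1, xadj, List.replicate edges.length 1,
   edges.map (fun p => p.2 - 1))

-- ===== PRECONDITION & SPEC =====
def Spec_build_csr (adj : List (List Int)) (out : List Int × List Int × List Int × List Int) : Prop := out = build_csr_alt adj
instance (adj : List (List Int)) (out : List Int × List Int × List Int × List Int) : Decidable (Spec_build_csr adj out) := by unfold Spec_build_csr; infer_instance

-- ===== CLAIM (what is proved, stated in full; the proofs are below) =====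
def Claim_equal_build_csr : Prop := ∀ (adj : List (List Int)), Dom_build_csr adj → Spec_build_csr adj (build_csr adj)

-- ===== LEMMAS AND PROOFS =====

def pvSortRow (s : List Int) : List Int := PySem.List.sorted s (fun x => x) false

def pvRow (adj : List (List Int)) (u : Int) : List Int := PySem.List.pyGetD adj u []

def pvTag (u : Int) (vs : List Int) : List (Int × Int) := vs.map (fun v => (u, v))

def pvLexLe (a b : Int × Int) : Prop := a.1 < b.1 ∨ (a.1 = b.1 ∧ a.2 ≤ b.2)

def pvBefore (a b : Int × Int) : Bool :=
  decide (a.1 < b.1) || (!decide (b.1 < a.1) && decide (a.2 < b.2))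

def pvAStep (st : List Int × List Int × List Int) (row : List Int) : List Int × List Int × List Int :=
  let neighbors := pvSortRow row
  let st2 := neighbors.foldl
    (fun (p : List Int × List Int) v => (p.1 ++ [v - 1], p.2 ++ [1])) (st.2.1, st.2.2)
  (st.1 ++ [(st2.1.length : Int)], st2.1, st2.2)

def pvBStep (x : List Int) (row : List Int) : List Int :=
  x ++ [PySem.List.pyGetD x (-1) 0 + (row.length : Int)]

def pvFlat (r : List (List Int)) : List Int :=
  r.flatMap (fun s => (pvSortRow s).map (fun v => v - 1))

def pvCStep (cs : List Int) (p : Int × Int) : List Int :=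
  cs.set p.1.toNat (cs.getD p.1.toNat 0 + 1)

-- the tagged edge list and its sorted-by-blocks form
def pvE (adj : List (List Int)) (m : Int) : List (Int × Int) :=
  (PySem.List.pyRange 1 m 1).flatMap (fun u => pvTag u (pvRow adj u))

def pvT (adj : List (List Int)) (m : Int) : List (Int × Int) :=
  (PySem.List.pyRange 1 m 1).flatMap (fun u => pvTag u (pvSortRow (pvRow adj u)))

lemma pvLexLe_antisymm {a b : Int × Int} (h1 : pvLexLe a b) (h2 : pvLexLe b a) : a = b := by
  rcases a with ⟨a1, a2⟩; rcases b with ⟨b1, b2⟩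
  simp only [pvLexLe] at h1 h2
  have : a1 = b1 ∧ a2 = b2 := by omega
  simp [this.1, this.2]

lemma pvInsert_pairwise (x : Int × Int) (ys : List (Int × Int))
    (h : ys.Pairwise pvLexLe) :
    (PySem.List.insertBy pvBefore x ys).Pairwise pvLexLe := by
  induction ys with
  | nil => simp [PySem.List.insertBy]
  | cons y ys ih =>
      rw [List.pairwise_cons] at h
      by_cases hb : pvBefore x y = true
      · rw [PySem.List.insertBy, if_pos hb]
        have hxy : pvLexLe x y := by
          simp only [pvBefore, Bool.or_eq_true, Bool.and_eq_true, Bool.not_eq_true',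
            decide_eq_true_eq, decide_eq_false_iff_not] at hb
          simp only [pvLexLe]
          omega
        refine List.Pairwise.cons ?_ (List.Pairwise.cons h.1 h.2)
        intro z hz
        rw [List.mem_cons] at hz
        rcases hz with rfl | hz
        · exact hxy
        · have := h.1 z hz
          simp only [pvLexLe] at hxy this ⊢; omega
      · rw [PySem.List.insertBy, if_neg hb]
        have hyx : pvLexLe y x := by
          simp only [pvBefore, Bool.or_eq_true, Bool.and_eq_true, Bool.not_eq_true',
            decide_eq_true_eq, decide_eq_false_iff_not, not_or, not_and] at hb
          simp only [pvLexLe]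
          omega
        refine List.Pairwise.cons ?_ (ih h.2)
        intro z hz
        rw [PySem.List.mem_insertBy] at hz
        rcases hz with rfl | hz
        · exact hyx
        · exact h.1 z hz

lemma pvFold_pairwise (xs : List (Int × Int)) :
    ∀ acc : List (Int × Int), acc.Pairwise pvLexLe →
    (xs.foldl (fun acc x => PySem.List.insertBy pvBefore x acc) acc).Pairwise pvLexLe := by
  induction xs with
  | nil => intro acc h; simpa using h
  | cons x xs ih =>
      intro acc h
      exact ih _ (pvInsert_pairwise x acc h)

lemma pvSorted2_eq_foldl (xs : List (Int × Int)) :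
    PySem.List.sorted2 xs (fun p => p.1) (fun p => p.2) false
      = xs.foldl (fun acc x => PySem.List.insertBy pvBefore x acc) [] := rfl

lemma pvT_pairwise (adj : List (List Int)) (m : Int) : (pvT adj m).Pairwise pvLexLe := by
  unfold pvT
  rw [List.flatMap_def, List.pairwise_flatten]
  constructor
  · intro l hl
    rw [List.mem_map] at hl
    obtain ⟨u, _, rfl⟩ := hl
    unfold pvTag
    rw [List.pairwise_map]
    have := PySem.List.sorted_pairwise (pvRow adj u) (fun x => x)
    refine this.imp ?_
    intro a b hab
    exact Or.inr ⟨rfl, hab⟩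
  · have hR := PySem.List.pairwise_lt_pyRange_one 1 m
    rw [List.pairwise_map]
    refine hR.imp ?_
    intro u1 u2 h12 x hx y hy
    unfold pvTag at hx hy
    rw [List.mem_map] at hx hy
    obtain ⟨v1, _, rfl⟩ := hx
    obtain ⟨v2, _, rfl⟩ := hy
    exact Or.inl h12

lemma pvT_perm_E (adj : List (List Int)) (m : Int) : (pvT adj m).Perm (pvE adj m) := by
  unfold pvT pvE
  refine List.Perm.flatMap_left _ ?_
  intro u _
  exact (PySem.List.sorted_perm (pvRow adj u) (fun x => x) false).map _

-- the global sort of the tagged edge list is exactly the per-block sorted list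
lemma pvSortedT (adj : List (List Int)) (m : Int) :
    PySem.List.sorted2 (pvE adj m) (fun p => p.1) (fun p => p.2) false = pvT adj m := by
  refine List.Perm.eq_of_pairwise (fun a b _ _ => pvLexLe_antisymm) ?_ (pvT_pairwise adj m) ?_
  · rw [pvSorted2_eq_foldl]
    exact pvFold_pairwise _ [] (by simp)
  · exact (PySem.List.sorted2_perm _ _ _ _).trans (pvT_perm_E adj m).symm

lemma pvInner (ns : List Int) : ∀ (a c : List Int),
    ns.foldl (fun (p : List Int × List Int) v => (p.1 ++ [v - 1], p.2 ++ [1])) (a, c)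
      = (a ++ ns.map (fun v => v - 1), c ++ List.replicate ns.length 1) := by
  induction ns with
  | nil => intro a c; simp
  | cons v ns ih =>
      intro a c
      simp only [List.foldl_cons, List.map_cons, List.length_cons, ih]
      simp [List.replicate_succ]

lemma pvMain : ∀ (r : List (List Int)) (x a : List Int),
    PySem.List.pyGetD x (-1) 0 = (a.length : Int) →
    r.foldl pvAStep (x, a, List.replicate a.length 1)
      = ((r.map pvSortRow).foldl pvBStep x,
         a ++ pvFlat r,
         List.replicate (a ++ pvFlat r).length 1) := by
  intro r
  induction r with
  | nil => intro x a h; simp [pvFlat]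
  | cons row r ih =>
      intro x a h
      have hstep : pvAStep (x, a, List.replicate a.length 1) row
          = (x ++ [((a ++ (pvSortRow row).map (fun v => v - 1)).length : Int)],
             a ++ (pvSortRow row).map (fun v => v - 1),
             List.replicate (a ++ (pvSortRow row).map (fun v => v - 1)).length 1) := by
        simp only [pvAStep, pvInner]
        simp [List.replicate_append_replicate, List.length_append]
      have hlast : PySem.List.pyGetD
          (x ++ [((a ++ (pvSortRow row).map (fun v => v - 1)).length : Int)]) (-1) 0
          = ((a ++ (pvSortRow row).map (fun v => v - 1)).length : Int) :=
        PySem.List.pyGetD_neg_one_append_singleton _ _ _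
      have hB : pvBStep x (pvSortRow row)
          = x ++ [((a ++ (pvSortRow row).map (fun v => v - 1)).length : Int)] := by
        simp only [pvBStep, h]
        simp [List.length_append]
      simp only [List.foldl_cons, List.map_cons, hstep, ih _ _ hlast, hB]
      simp [pvFlat, List.append_assoc]

-- counting fold: length preserved, and entry j accumulates the number of tags equal to j
lemma pvCFold_length (l : List (Int × Int)) : ∀ cs : List Int,
    (l.foldl pvCStep cs).length = cs.length := by
  induction l with
  | nil => intro cs; rfl
  | cons p l ih => intro cs; simp [List.foldl_cons, ih, pvCStep, List.length_set]

lemma pvCFold_getD (l : List (Int × Int)) : ∀ (cs : List Int),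
    (∀ p ∈ l, 0 ≤ p.1 ∧ p.1.toNat < cs.length) → ∀ (j : Nat),
    (l.foldl pvCStep cs).getD j 0
      = cs.getD j 0 + ((l.map Prod.fst).count ((j : Nat) : Int) : Int) := by
  induction l with
  | nil => intro cs _ j; simp
  | cons p l ih =>
      intro cs h j
      have hp := h p (by simp)
      have hlen : (pvCStep cs p).length = cs.length := by simp [pvCStep, List.length_set]
      have hrest : ∀ q ∈ l, 0 ≤ q.1 ∧ q.1.toNat < (pvCStep cs p).length := by
        intro q hq; rw [hlen]; exact h q (by simp [hq])
      rw [List.foldl_cons, ih _ hrest j]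
      have hset : (pvCStep cs p).getD j 0
          = cs.getD j 0 + (if p.1 = (j : Int) then 1 else 0) := by
        by_cases hij : p.1.toNat = j
        · have hpj : p.1 = (j : Int) := by omega
          have hjlt : j < cs.length := hij ▸ hp.2
          rw [if_pos hpj]
          unfold pvCStep
          rw [hij, List.getD_eq_getElem?_getD, List.getElem?_set_self (by simpa using hjlt)]
          simp
        · have hpj : ¬ p.1 = (j : Int) := by omega
          rw [if_neg hpj]
          unfold pvCStep
          rw [List.getD_eq_getElem?_getD, List.getD_eq_getElem?_getD,
              List.getElem?_set_ne hij]
          simp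
      rw [hset]
      simp only [List.map_cons, List.count_cons]
      by_cases hpj : p.1 = (j : Int)
      · simp [hpj]
        ring
      · simp [hpj]

lemma pvCountRep (f : Int → Nat) : ∀ (l : List Int), l.Nodup → ∀ (j : Int),
    ((l.flatMap (fun u => List.replicate (f u) u)).count j : Int)
      = if j ∈ l then (f j : Int) else 0 := by
  intro l
  induction l with
  | nil => intro _ j; simp
  | cons u l ih =>
      intro hnd j
      rw [List.nodup_cons] at hnd
      rw [List.flatMap_cons, List.count_append, List.count_replicate]
      by_cases hj : j = u
      · subst hj
        have : j ∉ l := hnd.1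
        simp [ih hnd.2 j, this]
      · have : (u == j) = false := by simp [Ne.symm hj]
        simp [this, ih hnd.2 j, hj]

lemma pvMapFst_T (adj : List (List Int)) (m : Int) :
    (pvT adj m).map Prod.fst
      = (PySem.List.pyRange 1 m 1).flatMap
          (fun u => List.replicate (pvSortRow (pvRow adj u)).length u) := by
  unfold pvT pvTag
  rw [List.map_flatMap]
  refine List.flatMap_congr ?_ ; intro u _
  rw [List.map_map]
  exact List.map_const'

lemma pvCounts_final (adj : List (List Int)) (n : Int) (hn : 0 ≤ n) :
    (pvT adj (n + 1)).foldl pvCStep (List.replicate (n + 1).toNat 0)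
      = 0 :: (PySem.List.pyRange 1 (n + 1) 1).map
          (fun u => ((pvSortRow (pvRow adj u)).length : Int)) := by
  have hmemT : ∀ p ∈ pvT adj (n + 1), 1 ≤ p.1 ∧ p.1 < n + 1 := by
    intro p hp
    unfold pvT pvTag at hp
    rw [List.mem_flatMap] at hp
    obtain ⟨u, hu, hp⟩ := hp
    rw [List.mem_map] at hp
    obtain ⟨v, _, rfl⟩ := hp
    exact PySem.List.mem_pyRange_one.mp hu
  have hlenR : (PySem.List.pyRange 1 (n + 1) 1).length = n.toNat := by
    rw [PySem.List.length_pyRange_one]; omega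
  have hlenL : ((pvT adj (n + 1)).foldl pvCStep (List.replicate (n + 1).toNat 0)).length
      = (n + 1).toNat := by
    rw [pvCFold_length, List.length_replicate]
  have hcount := pvCFold_getD (pvT adj (n + 1)) (List.replicate (n + 1).toNat 0)
    (by intro p hp
        have := hmemT p hp
        constructor
        · omega
        · rw [List.length_replicate]; omega)
  apply List.ext_getElem
  · rw [hlenL]; simp [hlenR]; omega
  · intro i h1 h2
    rw [← List.getD_eq_getElem _ 0 h1, hcount i,
        pvMapFst_T adj (n + 1),
        pvCountRep _ _ (PySem.List.nodup_pyRange_one 1 (n + 1)) _]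
    have hrep : (List.replicate (n + 1).toNat (0:Int)).getD i 0 = 0 := by
      rw [List.getD_eq_getElem _ _ (by rw [List.length_replicate, ← hlenL]; exact h1)]
      simp
    rw [hrep]
    by_cases hi : i = 0
    · subst hi
      have h0 : ((0:Nat) : Int) ∉ PySem.List.pyRange 1 (n + 1) 1 := by
        rw [PySem.List.mem_pyRange_one]; omega
      simp only [if_neg h0]
      simp
    · have hi1 : 1 ≤ i := by omega
      have hiR : ((i : Nat) : Int) ∈ PySem.List.pyRange 1 (n + 1) 1 := by
        rw [PySem.List.mem_pyRange_one]
        omega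
      rw [if_pos hiR]
      have hi2 : i - 1 < (PySem.List.pyRange 1 (n + 1) 1).length := by
        rw [hlenR]; omega
      have : (0 :: (PySem.List.pyRange 1 (n + 1) 1).map
          (fun u => ((pvSortRow (pvRow adj u)).length : Int)))[i]
          = ((PySem.List.pyRange 1 (n + 1) 1).map
              (fun u => ((pvSortRow (pvRow adj u)).length : Int)))[i - 1]'(by
                rw [List.length_map]; exact hi2) := by
        rcases i with _ | i
        · omega
        · simp
      rw [this, List.getElem_map, PySem.List.getElem_pyRange_one]
      have : (1 : Int) + ((i - 1 : Nat) : Int) = ((i : Nat) : Int) := by omega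
      rw [this]
      omega

-- the two iteration ranges are the same list of nodes
lemma pvRangeEq (L : Nat) :
    PySem.List.pyRange 1 ((L : Int) - 1 + 1) 1
      = PySem.List.pyRange 1 (max ((L : Int) - 1) 0 + 1) 1 := by
  by_cases h : (L : Int) - 1 < 0
  · have h0 : (L : Int) = 0 := by omega
    rw [h0]
    rw [PySem.List.pyRange_one_eq_nil (by norm_num), PySem.List.pyRange_one_eq_nil (by norm_num)]
  · have : max ((L : Int) - 1) 0 = (L : Int) - 1 := by omega
    rw [this]

-- ===== VERDICT (by name: the statement is the Claim_ definition above) =====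
theorem build_csr_spec : Claim_equal_build_csr := by
  intro adj _
  show build_csr adj = build_csr_alt adj
  unfold build_csr build_csr_alt
  simp only []
  rw [pvRangeEq adj.length]
  have hEfold : (PySem.List.pyRange 1 (max ((adj.length : Int) - 1) 0 + 1) 1).foldl
      (fun (st : List Int × List Int × List Int) u =>
        let neighbors := PySem.List.sorted (PySem.List.pyGetD adj u []) (fun x => x) false
        let st2 := neighbors.foldl
          (fun (p : List Int × List Int) v => (p.1 ++ [v - 1], p.2 ++ [1])) (st.2.1, st.2.2)
        (st.1 ++ [(st2.1.length : Int)], st2.1, st2.2))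
      ([0], [], [])
      = ((PySem.List.pyRange 1 (max ((adj.length : Int) - 1) 0 + 1) 1).map (pvRow adj)).foldl
          pvAStep ([0], [], []) := by rw [List.foldl_map]; rfl
  rw [hEfold]
  have hmain := pvMain ((PySem.List.pyRange 1 (max ((adj.length : Int) - 1) 0 + 1) 1).map (pvRow adj)) [0] [] (by decide)
  simp only [List.length_nil, List.replicate_zero, List.nil_append] at hmain
  rw [hmain]
  have hsorted : PySem.List.sorted2
      ((PySem.List.pyRange 1 (max ((adj.length : Int) - 1) 0 + 1) 1).flatMap
        (fun u => (PySem.List.pyGetD adj u []).map (fun v => (u, v))))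
      (fun p => p.1) (fun p => p.2) false
      = pvT adj (max ((adj.length : Int) - 1) 0 + 1) :=
    pvSortedT adj _
  rw [hsorted]
  have hcounts : (pvT adj (max ((adj.length : Int) - 1) 0 + 1)).foldl
      (fun cs p => cs.set p.1.toNat (cs.getD p.1.toNat 0 + 1))
      (List.replicate (max ((adj.length : Int) - 1) 0 + 1).toNat 0)
      = 0 :: (PySem.List.pyRange 1 (max ((adj.length : Int) - 1) 0 + 1) 1).map
          (fun u => ((pvSortRow (pvRow adj u)).length : Int)) :=
    pvCounts_final adj _ (le_max_right _ _)
  rw [hcounts]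
  have hslice : PySem.List.slice
      (0 :: (PySem.List.pyRange 1 (max ((adj.length : Int) - 1) 0 + 1) 1).map
          (fun u => ((pvSortRow (pvRow adj u)).length : Int))) (some 1) none
      = (PySem.List.pyRange 1 (max ((adj.length : Int) - 1) 0 + 1) 1).map
          (fun u => ((pvSortRow (pvRow adj u)).length : Int)) := by
    simpa using PySem.List.slice_from_natCast
      (0 :: (PySem.List.pyRange 1 (max ((adj.length : Int) - 1) 0 + 1) 1).map
          (fun u => ((pvSortRow (pvRow adj u)).length : Int))) 1
  rw [hslice]
  simp only [Prod.mk.injEq]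
  refine ⟨?_, ?_, ?_, ?_⟩
  · congr 1
    omega
  · -- the prefix-sum folds
    rw [List.map_map, List.foldl_map, List.foldl_map]
    rfl
  · -- adjcwgt lengths
    congr 1
    simp [pvFlat, pvT, pvTag, pvSortRow, List.length_flatMap, List.map_map,
      Function.comp_def, PySem.List.length_sorted]
  · -- adjncy
    unfold pvT pvFlat pvTag
    rw [List.map_flatMap, List.flatMap_map]
    refine List.flatMap_congr ?_
    intro u _
    rw [List.map_map]
    rfl
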